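-- pv_equiv track=rewrite | github.com/chundrac/idcc | ACD_processing/process_data/simulate_sound_change.py | detectIDCC
-- ===== SOURCE A (Python) =====
-- def detectIDCC(w):
--     w_ = w.split()
--     counter = 0
--     for i,s in enumerate(w_):
--         if i > 0 and s == w_[i-1]:
--             counter += 1
--     if counter > 0:
--         return(1)
--     else:
--         return(0)
-- ===== SOURCE B (Python) =====
-- def _runs(tokens):
--     # number of maximal runs of equal adjacent tokens: strip one run, recurse
--     if not tokens:
--         return 0
--     head, rest = tokens[0], tokens[1:]
--     while rest and rest[0] == head:
--         rest = rest[1:]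
--     return 1 + _runs(rest)
--
-- def detectIDCC(w):
--     w_ = w.split()
--     # fewer runs than tokens <=> some adjacent pair of tokens is equal
--     return int(_runs(w_) < len(w_))
-- ===== Notes on version B (the rewrite author's own statement) =====
-- stated objective: alternative
-- what changed: Instead of A's indexed scan that counts positions equal to their predecessor and thresholds the counter, B recursively strips maximal runs of equal adjacent tokens, counts the runs, and returns int(run_count < token_count) - fewer runs than tokens means some adjacent pair was equal.
import Mathlib
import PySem

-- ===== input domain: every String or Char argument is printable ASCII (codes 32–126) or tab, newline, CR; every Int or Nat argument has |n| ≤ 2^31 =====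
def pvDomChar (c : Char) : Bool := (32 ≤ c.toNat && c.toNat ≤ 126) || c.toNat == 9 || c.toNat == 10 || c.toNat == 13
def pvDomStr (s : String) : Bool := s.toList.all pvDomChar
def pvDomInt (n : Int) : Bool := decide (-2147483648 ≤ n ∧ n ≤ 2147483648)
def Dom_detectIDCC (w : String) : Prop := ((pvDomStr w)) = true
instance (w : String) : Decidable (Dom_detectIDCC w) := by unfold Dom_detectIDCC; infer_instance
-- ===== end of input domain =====

-- B replaces A's predecessor-index counting scan by a run decomposition: recursively strip
-- maximal runs of equal adjacent tokens, count the runs and compare with the token count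
-- (alternative decomposition; same cost).

-- ===== PORT A =====
def detectIDCC (w : String) : Int :=
  let w_ := PySem.Str.split₀ w
  let counter := (PySem.List.enumerate w_ 0).foldl
    (fun c p => if p.1 > 0 ∧ PySem.List.pyGet? w_ (p.1 - 1) = some p.2 then c + 1 else c) (0 : Int)
  if counter > 0 then 1 else 0

-- ===== PORT B =====
-- number of maximal runs of equal adjacent tokens (Source B's _runs; the while loop stripping
-- the leading run is the standard-library dropWhile)
def pvRuns : List String → Nat
  | [] => 0
  | x :: xs => 1 + pvRuns (xs.dropWhile (· == x))
termination_by l => l.length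
decreasing_by
  exact Nat.lt_succ_of_le (List.length_dropWhile_le _ _)

def detectIDCC_alt (w : String) : Int :=
  let w_ := PySem.Str.split₀ w
  if pvRuns w_ < w_.length then 1 else 0

-- ===== PRECONDITION & SPEC =====
def Spec_detectIDCC (w : String) (out : Int) : Prop := out = detectIDCC_alt w
instance (w : String) (out : Int) : Decidable (Spec_detectIDCC w out) := by unfold Spec_detectIDCC; infer_instance

-- ===== CLAIM (what is proved, stated in full; the proofs are below) =====
def Claim_equal_detectIDCC : Prop := ∀ (w : String), Dom_detectIDCC w → Spec_detectIDCC w (detectIDCC w)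

-- ===== LEMMAS AND PROOFS =====

-- A's counter is positive iff some adjacent pair of tokens is equal.
theorem detectIDCC_key (l : List String) :
    ((PySem.List.enumerate l 0).foldl
      (fun c p => if p.1 > 0 ∧ PySem.List.pyGet? l (p.1 - 1) = some p.2 then c + 1 else c) (0 : Int) > 0)
    ↔ ((l.zip l.tail).any (fun p => p.1 == p.2) = true) := by
  rw [PySem.List.foldl_ite_add_one]
  simp only [zero_add, Int.natCast_pos, List.countP_pos_iff, List.any_eq_true,
    PySem.List.mem_enumerate_iff, decide_eq_true_eq]
  constructor
  · rintro ⟨p, ⟨k, hk, rfl⟩, hpos, hget⟩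
    dsimp only at hpos hget
    have hk1 : 1 ≤ k := by exact_mod_cast hpos
    have : ((k : Int) - 1) = ((k - 1 : Nat) : Int) := by omega
    rw [this, PySem.List.pyGet?_natCast] at hget
    have hkm : k - 1 < l.length := by omega
    rw [List.getElem?_eq_getElem hkm] at hget
    refine ⟨(l[k - 1], l[k]), ?_, ?_⟩
    · rw [List.mem_iff_getElem]
      have hlen : k - 1 < (l.zip l.tail).length := by
        simp [List.length_zip, List.length_tail]; omega
      refine ⟨k - 1, hlen, ?_⟩
      rw [List.getElem_zip, List.getElem_tail]
      refine Prod.ext rfl ?_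
      simp only
      congr 1
      omega
    · simpa only [beq_iff_eq] using Option.some.inj hget
  · rintro ⟨q, hq, heq⟩
    rw [List.mem_iff_getElem] at hq
    obtain ⟨i, hlen, rfl⟩ := hq
    have hi : i + 1 < l.length := by
      simp [List.length_zip, List.length_tail] at hlen; omega
    refine ⟨((i + 1 : Nat), l[i + 1]), ⟨i + 1, hi, by simp⟩, ?_, ?_⟩
    · simp
    · simp only
      have : ((i + 1 : Nat) : Int) - 1 = ((i : Nat) : Int) := by omega
      rw [this, PySem.List.pyGet?_natCast, List.getElem?_eq_getElem (by omega : i < l.length)]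
      rw [List.getElem_zip] at heq
      simp only [beq_iff_eq] at heq
      rw [List.getElem_tail] at heq
      exact congrArg some heq

theorem pvRuns_le_length (l : List String) : pvRuns l ≤ l.length := by
  fun_induction pvRuns with
  | case1 => simp
  | case2 x xs ih =>
    have := List.length_dropWhile_le (fun s => s == x) xs
    simp only [List.length_cons]
    omega

theorem pvRuns_lt_iff (l : List String) :
    (pvRuns l < l.length) ↔ ((l.zip l.tail).any (fun p => p.1 == p.2) = true) := by
  fun_induction pvRuns with
  | case1 => simp
  | case2 x xs ih =>
    cases xs with
    | nil => simp [pvRuns]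
    | cons y ys =>
      by_cases h : y = x
      · subst h
        rw [List.dropWhile_cons_of_pos (by simp)] at ih ⊢
        have h1 := pvRuns_le_length (ys.dropWhile (· == y))
        have h2 := List.length_dropWhile_le (fun s => s == y) ys
        simp only [List.length_cons, List.tail_cons, List.zip_cons_cons, List.any_cons,
          beq_self_eq_true, Bool.true_or, iff_true]
        omega
      · have hb : (y == x) = false := beq_eq_false_iff_ne.2 h
        have hxy : (x == y) = false := beq_eq_false_iff_ne.2 (fun e => h e.symm)
        rw [List.dropWhile_cons_of_neg (by simp [hb])] at ih ⊢
        simp only [List.length_cons, List.tail_cons, List.zip_cons_cons, List.any_cons,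
          hxy, Bool.false_or] at ih ⊢
        rw [← ih]
        omega

-- ===== VERDICT (by name: the statement is the Claim_ definition above) =====
theorem detectIDCC_spec : Claim_equal_detectIDCC := by
  intro w _
  unfold Spec_detectIDCC detectIDCC detectIDCC_alt
  by_cases h : ((PySem.Str.split₀ w).zip (PySem.Str.split₀ w).tail).any (fun p => p.1 == p.2) = true
  · rw [if_pos ((pvRuns_lt_iff _).2 h), if_pos ((detectIDCC_key _).2 h)]
  · rw [if_neg (fun hc => h ((pvRuns_lt_iff _).1 hc)),
        if_neg (fun hc => h ((detectIDCC_key _).1 hc))]
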